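-- pv_equiv track=rewrite | github.com/joelgrus/advent2020 | advent2020/day09.py | not_sums
-- ===== SOURCE A (Python) =====
-- from typing import List, Iterator
-- from collections import deque
--
-- def not_sums(numbers: List[int], lookback: int = 25) -> Iterator[int]:
--     q = deque()
--     for n in numbers:
--         if len(q) < lookback:
--             q.append(n)
--         else:
--             sums = {a + b
--                     for i, a in enumerate(q)
--                     for j, b in enumerate(q)
--                     if i < j}
--             if n not in sums:
--                 yield n
--             q.append(n)
--             q.popleft()
-- ===== SOURCE B (Python) =====
-- from typing import List, Iterator
-- from collections import deque, Counter
--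
-- def not_sums(numbers: List[int], lookback: int = 25) -> Iterator[int]:
--     window = deque()
--     counts = Counter()
--     for n in numbers:
--         if len(window) < lookback:
--             window.append(n)
--             counts[n] += 1
--         else:
--             if not any(counts[n - a] > (1 if n - a == a else 0) for a in window):
--                 yield n
--             window.append(n)
--             counts[n] += 1
--             old = window.popleft()
--             counts[old] -= 1
-- ===== Notes on version B (the rewrite author's own statement) =====
-- stated objective: faster
-- what changed: Instead of rebuilding the full set of all O(lookback^2) pairwise sums of the window at every step, B maintains a running Counter of the window across steps and tests 'n is a sum of two distinct window entries' by scanning the window once, checking whether n-a is present (with count >= 2 when n-a == a).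
import Mathlib
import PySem

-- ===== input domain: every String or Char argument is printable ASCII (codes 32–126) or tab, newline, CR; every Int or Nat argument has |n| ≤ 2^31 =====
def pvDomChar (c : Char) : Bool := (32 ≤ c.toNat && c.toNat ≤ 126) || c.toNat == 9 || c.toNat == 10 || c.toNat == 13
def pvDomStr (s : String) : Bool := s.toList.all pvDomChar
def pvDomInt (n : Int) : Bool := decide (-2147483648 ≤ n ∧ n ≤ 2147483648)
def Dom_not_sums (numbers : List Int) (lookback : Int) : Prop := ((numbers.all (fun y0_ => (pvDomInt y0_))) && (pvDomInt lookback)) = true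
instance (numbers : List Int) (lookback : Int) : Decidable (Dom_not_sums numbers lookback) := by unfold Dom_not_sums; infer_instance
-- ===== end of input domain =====

-- B replaces A's per-step rebuild of all O(lookback²) pairwise sums by a running Counter of the
-- window, testing "n is a sum of two window entries" in O(lookback) per step (objective: faster).


-- ===== PORT A =====
-- loop body of A: state = (q, yielded output)
def stepA (lookback : Int) (st : List Int × List Int) (n : Int) : List Int × List Int :=
  let q := st.1
  let out := st.2
  if (q.length : Int) < lookback then (q ++ [n], out)
  else
    -- sums = {a + b for i, a in enumerate(q) for j, b in enumerate(q) if i < j}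
    let sums : PySem.Set Int := PySem.Set.ofList
      ((PySem.List.enumerate q).flatMap (fun ia =>
        (PySem.List.enumerate q).filterMap (fun jb =>
          if ia.1 < jb.1 then some (ia.2 + jb.2) else none)))
    let out := if !(PySem.Set.contains sums n) then out ++ [n] else out
    -- q.append(n); q.popleft()  (q ++ [n] is nonempty, so .tail is exactly popleft)
    ((q ++ [n]).tail, out)

def not_sums (numbers : List Int) (lookback : Int) : List Int :=
  (numbers.foldl (stepA lookback) ([], [])).2

-- ===== PORT B =====
-- loop body of B: state = (window, counts, yielded output)
def stepB (lookback : Int) (st : List Int × PySem.Dict Int Int × List Int) (n : Int) :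
    List Int × PySem.Dict Int Int × List Int :=
  let w := st.1
  let counts := st.2.1
  let out := st.2.2
  if (w.length : Int) < lookback then
    (w ++ [n], counts.modify n 0 (· + 1), out)
  else
    let hit := w.any (fun a => (if n - a = a then (1 : Int) else 0) < counts.getD (n - a) 0)
    let out := if !hit then out ++ [n] else out
    let w2 := w ++ [n]
    let counts2 := counts.modify n 0 (· + 1)
    -- old = window.popleft(): w2 is nonempty, so headI/tail are exact
    let old := w2.headI
    (w2.tail, counts2.modify old 0 (· - 1), out)

def not_sums_alt (numbers : List Int) (lookback : Int) : List Int :=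
  (numbers.foldl (stepB lookback) ([], PySem.Dict.empty, [])).2.2

-- ===== PRECONDITION & SPEC =====
def Spec_not_sums (numbers : List Int) (lookback : Int) (out : List Int) : Prop := out = not_sums_alt numbers lookback
instance (numbers : List Int) (lookback : Int) (out : List Int) : Decidable (Spec_not_sums numbers lookback out) := by unfold Spec_not_sums; infer_instance

-- ===== CLAIM (what is proved, stated in full; the proofs are below) =====
def Claim_equal_not_sums : Prop := ∀ (numbers : List Int) (lookback : Int), Dom_not_sums numbers lookback → Spec_not_sums numbers lookback (not_sums numbers lookback)

-- ===== LEMMAS AND PROOFS =====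

-- two distinct positions with the same value ↔ count ≥ 2
theorem count_two_iff (q : List Int) (a : Int) :
    2 ≤ q.count a ↔ ∃ i j : Nat, i < j ∧ q[i]? = some a ∧ q[j]? = some a := by
  induction q with
  | nil => simp
  | cons x t ih =>
    constructor
    · intro h
      rw [List.count_cons] at h
      by_cases hxa : x = a
      · have ht : a ∈ t := by rw [hxa] at h; simpa using h
        obtain ⟨j, hj⟩ := List.mem_iff_getElem?.mp ht
        exact ⟨0, j + 1, by omega, by simp [hxa], by simpa using hj⟩
      · have : 2 ≤ t.count a := by simp [hxa] at h; omega
        obtain ⟨i, j, hij, hi, hj⟩ := ih.mp this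
        exact ⟨i + 1, j + 1, by omega, by simpa using hi, by simpa using hj⟩
    · rintro ⟨i, j, hij, hi, hj⟩
      obtain ⟨j', rfl⟩ : ∃ j', j = j' + 1 := ⟨j - 1, by omega⟩
      simp only [List.getElem?_cons_succ] at hj
      have htj : a ∈ t := List.mem_iff_getElem?.mpr ⟨j', hj⟩
      have h1 : 1 ≤ t.count a := List.count_pos_iff.mpr htj
      rw [List.count_cons]
      rcases i with _ | i'
      · simp at hi
        simp [hi]
        omega
      · simp only [List.getElem?_cons_succ] at hi
        have : 2 ≤ t.count a := ih.mpr ⟨i', j', by omega, hi, hj⟩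
        omega

-- distinct values in q sit at distinct positions
theorem two_vals_two_idx (q : List Int) (a b : Int) (hab : a ≠ b) (ha : a ∈ q) (hb : b ∈ q) :
    ∃ i j : Nat, i ≠ j ∧ q[i]? = some a ∧ q[j]? = some b := by
  obtain ⟨i, hi⟩ := List.mem_iff_getElem?.mp ha
  obtain ⟨j, hj⟩ := List.mem_iff_getElem?.mp hb
  refine ⟨i, j, ?_, hi, hj⟩
  rintro rfl
  rw [hi] at hj
  exact hab (Option.some.inj hj)

-- the central equivalence: n is a sum of two window entries at distinct positions
theorem key_iff (q : List Int) (n : Int) :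
    (∃ (k k' : Nat) (_ : k < q.length) (_ : k' < q.length), k < k' ∧ q[k]! + q[k']! = n) ↔
      ∃ a ∈ q, (if n - a = a then (1 : Int) else 0) < (q.count (n - a) : Int) := by
  constructor
  · rintro ⟨k, k', hk, hk', hkk, hsum⟩
    simp only [List.getElem!_eq_getElem?_getD, List.getElem?_eq_getElem hk,
      List.getElem?_eq_getElem hk', Option.getD_some] at hsum
    refine ⟨q[k], List.getElem_mem hk, ?_⟩
    have hb : n - q[k] = q[k'] := by omega
    rw [hb]
    by_cases hba : q[k'] = q[k]
    · rw [if_pos hba]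
      have : 2 ≤ q.count q[k'] := count_two_iff q q[k'] |>.mpr
        ⟨k, k', hkk, by rw [List.getElem?_eq_getElem hk, hba], by rw [List.getElem?_eq_getElem hk']⟩
      exact_mod_cast this
    · rw [if_neg hba]
      have : 0 < q.count q[k'] := List.count_pos_iff.mpr (List.getElem_mem hk')
      exact_mod_cast this
  · rintro ⟨a, ha, hlt⟩
    by_cases hba : n - a = a
    · rw [if_pos hba] at hlt
      have h2 : 2 ≤ q.count a := by rw [hba] at hlt; exact_mod_cast hlt
      obtain ⟨i, j, hij, hi, hj⟩ := (count_two_iff q a).mp h2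
      obtain ⟨hi', hiv⟩ := List.getElem?_eq_some_iff.mp hi
      obtain ⟨hj', hjv⟩ := List.getElem?_eq_some_iff.mp hj
      refine ⟨i, j, hi', hj', hij, ?_⟩
      simp only [List.getElem!_eq_getElem?_getD, List.getElem?_eq_getElem hi',
        List.getElem?_eq_getElem hj', Option.getD_some, hiv, hjv]
      omega
    · rw [if_neg hba] at hlt
      have hbq : n - a ∈ q := List.count_pos_iff.mp (by exact_mod_cast hlt)
      obtain ⟨i, j, hij, hi, hj⟩ := two_vals_two_idx q a (n - a) (by omega) ha hbq
      obtain ⟨hi', hiv⟩ := List.getElem?_eq_some_iff.mp hi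
      obtain ⟨hj', hjv⟩ := List.getElem?_eq_some_iff.mp hj
      rcases Nat.lt_or_ge i j with hlt' | hge
      · refine ⟨i, j, hi', hj', hlt', ?_⟩
        simp only [List.getElem!_eq_getElem?_getD, List.getElem?_eq_getElem hi',
          List.getElem?_eq_getElem hj', Option.getD_some, hiv, hjv]
        omega
      · refine ⟨j, i, hj', hi', by omega, ?_⟩
        simp only [List.getElem!_eq_getElem?_getD, List.getElem?_eq_getElem hj',
          List.getElem?_eq_getElem hi', Option.getD_some, hiv, hjv]
        omega

-- A's set-membership test equals B's counter test, given the counter models the window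
theorem cond_eq (q : List Int) (counts : PySem.Dict Int Int) (n : Int)
    (h : ∀ x, counts.getD x 0 = (q.count x : Int)) :
    PySem.Set.contains (PySem.Set.ofList
      ((PySem.List.enumerate q).flatMap (fun ia =>
        (PySem.List.enumerate q).filterMap (fun jb =>
          if ia.1 < jb.1 then some (ia.2 + jb.2) else none)))) n
      = q.any (fun a => decide ((if n - a = a then (1 : Int) else 0) < counts.getD (n - a) 0)) := by
  rw [← Bool.coe_iff_coe]
  have hL : (PySem.Set.contains (PySem.Set.ofList
      ((PySem.List.enumerate q).flatMap (fun ia =>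
        (PySem.List.enumerate q).filterMap (fun jb =>
          if ia.1 < jb.1 then some (ia.2 + jb.2) else none)))) n = true) ↔
      (∃ (k k' : Nat) (_ : k < q.length) (_ : k' < q.length), k < k' ∧ q[k]! + q[k']! = n) := by
    simp only [PySem.Set.contains, List.contains_iff_mem, PySem.Set.mem_ofList, List.mem_flatMap,
      List.mem_filterMap, PySem.List.mem_enumerate_iff]
    constructor
    · rintro ⟨p, ⟨k, hk, rfl⟩, p2, ⟨k', hk', rfl⟩, hif⟩
      simp only at hif
      split_ifs at hif with hc
      · refine ⟨k, k', hk, hk', by exact_mod_cast (by omega : ((k : Int)) < (k' : Int)), ?_⟩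
        simp only [List.getElem!_eq_getElem?_getD, List.getElem?_eq_getElem hk,
          List.getElem?_eq_getElem hk', Option.getD_some]
        exact Option.some.inj hif
    · rintro ⟨k, k', hk, hk', hkk, hsum⟩
      refine ⟨(0 + (k : Int), q[k]), ⟨k, hk, rfl⟩, (0 + (k' : Int), q[k']), ⟨k', hk', rfl⟩, ?_⟩
      have hc : (0 + (k : Int)) < 0 + (k' : Int) := by omega
      rw [if_pos hc]
      simp only [List.getElem!_eq_getElem?_getD, List.getElem?_eq_getElem hk,
        List.getElem?_eq_getElem hk', Option.getD_some] at hsum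
      simp [hsum]
  rw [hL, List.any_eq_true]
  simp only [decide_eq_true_eq, h]
  exact key_iff q n

-- one step preserves the correspondence
theorem step_eq (lookback : Int) (q out : List Int) (counts : PySem.Dict Int Int)
    (h : ∀ x, counts.getD x 0 = (q.count x : Int)) :
    (stepB lookback (q, counts, out) n).1 = (stepA lookback (q, out) n).1 ∧
    (stepB lookback (q, counts, out) n).2.2 = (stepA lookback (q, out) n).2 ∧
    (∀ x, (stepB lookback (q, counts, out) n).2.1.getD x 0 =
      ((stepA lookback (q, out) n).1.count x : Int)) := by
  by_cases hlen : (q.length : Int) < lookback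
  · refine ⟨?_, ?_, ?_⟩ <;> simp only [stepA, stepB, if_pos hlen]
    · intro x
      rw [PySem.Dict.getD_modify]
      simp only [h, List.count_append, List.count_cons, List.count_nil]
      by_cases hxn : x = n <;> simp [hxn] <;> omega
  · have hA : stepA lookback (q, out) n =
        ((q ++ [n]).tail,
          if !(PySem.Set.contains (PySem.Set.ofList
            ((PySem.List.enumerate q).flatMap (fun ia =>
              (PySem.List.enumerate q).filterMap (fun jb =>
                if ia.1 < jb.1 then some (ia.2 + jb.2) else none)))) n)
          then out ++ [n] else out) := by
      simp only [stepA, if_neg hlen]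
    have hB : stepB lookback (q, counts, out) n =
        ((q ++ [n]).tail,
          ((counts.modify n 0 (· + 1)).modify ((q ++ [n]).headI) 0 (· - 1)),
          if !(q.any (fun a =>
              decide ((if n - a = a then (1 : Int) else 0) < counts.getD (n - a) 0)))
          then out ++ [n] else out) := by
      simp only [stepB, if_neg hlen]
    rw [hA, hB]
    refine ⟨rfl, by rw [cond_eq q counts n h], ?_⟩
    clear hA hB
    intro x
    rcases hqn : q ++ [n] with _ | ⟨o, rest⟩
    · simp at hqn
    · have hc2 := congrArg (List.count x) hqn
      simp only [List.count_append, List.count_cons, List.count_nil, beq_iff_eq] at hc2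
      simp only [List.headI, List.tail_cons]
      rw [PySem.Dict.getD_modify, PySem.Dict.getD_modify, PySem.Dict.getD_modify]
      simp only [h]
      split_ifs at hc2 ⊢ <;> (try subst_vars) <;> omega

theorem loop_eq (ns : List Int) (lookback : Int) (q out : List Int)
    (counts : PySem.Dict Int Int) (h : ∀ x, counts.getD x 0 = (q.count x : Int)) :
    (ns.foldl (stepB lookback) (q, counts, out)).2.2 = (ns.foldl (stepA lookback) (q, out)).2 := by
  induction ns generalizing q counts out with
  | nil => rfl
  | cons n t ih =>
    obtain ⟨h1, h2, h3⟩ := step_eq (n := n) lookback q out counts h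
    simp only [List.foldl_cons]
    rw [show (stepB lookback (q, counts, out) n) =
      ((stepA lookback (q, out) n).1, (stepB lookback (q, counts, out) n).2.1,
        (stepA lookback (q, out) n).2) from ?_]
    · exact ih _ _ _ h3
    · exact Prod.ext h1 (Prod.ext rfl h2)

-- ===== VERDICT (by name: the statement is the Claim_ definition above) =====
theorem not_sums_spec : Claim_equal_not_sums := by
  intro numbers lookback _
  unfold Spec_not_sums not_sums not_sums_alt
  exact (loop_eq numbers lookback [] [] PySem.Dict.empty (by
    intro x; simp [PySem.Dict.getD_empty])).symm
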